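-- pv_equiv track=rewrite | github.com/cnTalon/CSC1015F | calendar_month.py | num_weeks
-- ===== SOURCE A (Python) =====
-- import math
--
-- def day_of_week(day, month, year):
--     # calculates the start day of the month
--     if month == "January" or month == 1 or month == "February" or month == 2:
--         start_day = ((day + math.floor(((13*(month+13))/5)) + (year-1) + math.floor(((year-1)/4)) - math.floor(((year-1)/100)) + math.floor(((year-1)/400)))) % 7
--         start_day = ((start_day+5)% 7)+1
--     else:
--         start_day = ((day + math.floor(13*(month+1)/5) + year + math.floor((year/4)) - math.floor((year/100)) + math.floor((year/400)))) % 7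
--         start_day = ((start_day+5)% 7)+1
--     return start_day
--
-- def is_leap(year):
--     # first half tests for not century year & if divisible by 4 ----- second half tests for century year & century year divided by 400 is leap
--     if ((year % 4 == 0) and (year % 100 !=0)) or ((year % 400 == 0) and (year % 100 == 0)):
--         return True
--     return False
--
-- def num_days_in(month_num, year):
--     # determines the number of days in a specific month
--     num_days = 0
--     if month_num == 1 or month_num == 3 or month_num == 5 or month_num == 7 or month_num == 8 or month_num== 10 or month_num==12:
--         num_days = 31
--     elif month_num == 4 or month_num == 6 or month_num == 9 or month_num == 11:
--         num_days = 30
--     elif month_num == 2: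
--         if is_leap(year) == True:       # checks for leap years and assigns appropriate number of days
--             num_days = 29
--         else:
--             num_days = 28
--     return num_days
--
-- def num_weeks(month_num, year):
--     # counts the number of weeks in a month
--     week = 0
--     for rows in range(1,num_days_in(month_num,year)+1):
--         if day_of_week(rows, month_num, year) == 7:
--             week += 1                               # counts the last day of each week & adds
--     if not day_of_week (num_days_in(month_num, year), month_num, year) == 7:
--         week +=1                                    # adds a week if the last day of the month is not sunday
--     return week
-- ===== SOURCE B (Python) =====
-- import math
--
-- def day_of_week(day, month, year):
--     # calculates the start day of the month
--     if month == "January" or month == 1 or month == "February" or month == 2: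
--         start_day = ((day + math.floor(((13*(month+13))/5)) + (year-1) + math.floor(((year-1)/4)) - math.floor(((year-1)/100)) + math.floor(((year-1)/400)))) % 7
--         start_day = ((start_day+5)% 7)+1
--     else:
--         start_day = ((day + math.floor(13*(month+1)/5) + year + math.floor((year/4)) - math.floor((year/100)) + math.floor((year/400)))) % 7
--         start_day = ((start_day+5)% 7)+1
--     return start_day
--
-- def is_leap(year):
--     return year % 4 == 0 and (year % 100 != 0 or year % 400 == 0)
--
-- def num_days_in(month_num, year):
--     if month_num == 2:
--         return 29 if is_leap(year) else 28
--     if month_num in (4, 6, 9, 11):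
--         return 30
--     if month_num in (1, 3, 5, 7, 8, 10, 12):
--         return 31
--     return 0
--
-- def num_weeks(month_num, year):
--     # closed form: count the Sundays arithmetically, then add one for a partial trailing week
--     ndays = num_days_in(month_num, year)
--     w1 = day_of_week(1, month_num, year)
--     fs = (7 - w1) % 7 + 1                      # date of the first Sunday
--     sundays = 0 if fs > ndays else (ndays - fs) // 7 + 1
--     return sundays + (0 if day_of_week(ndays, month_num, year) == 7 else 1)
-- ===== Notes on version B (the rewrite author's own statement) =====
-- stated objective: simpler
-- what changed: B replaces A's day-by-day loop over the month (calling day_of_week once per day) with a closed-form arithmetic count of the Sundays from the weekday of the 1st, plus A's trailing partial-week check.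
import Mathlib
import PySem

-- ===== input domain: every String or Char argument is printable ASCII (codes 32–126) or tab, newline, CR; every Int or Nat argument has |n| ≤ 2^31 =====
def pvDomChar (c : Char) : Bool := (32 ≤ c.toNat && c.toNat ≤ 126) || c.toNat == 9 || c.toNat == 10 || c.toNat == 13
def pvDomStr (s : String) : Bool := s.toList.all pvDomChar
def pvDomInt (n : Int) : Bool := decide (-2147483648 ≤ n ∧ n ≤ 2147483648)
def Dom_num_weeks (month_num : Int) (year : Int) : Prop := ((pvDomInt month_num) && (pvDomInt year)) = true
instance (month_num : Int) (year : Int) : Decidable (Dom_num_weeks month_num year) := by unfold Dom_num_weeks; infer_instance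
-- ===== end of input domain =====

-- B computes the Sunday count in closed form instead of A's day-by-day loop (objective: simpler).

-- ===== PORT A =====
-- day_of_week is shared verbatim by both Python files (Source B keeps it unchanged), so it is ported once.
-- math.floor applied to the float divisions equals integer floor division for |year| ≤ 2^31 (exact here since
-- the numerators are < 2^53 and the fractional parts stay ≥ 0.01 away from integers), ported as PySem.Int.floordiv.
def pv_day_of_week (day month year : Int) : Int :=
  if month == 1 || month == 2 then
    let s := PySem.Int.mod (day + PySem.Int.floordiv (13*(month+13)) 5 + (year-1)
              + PySem.Int.floordiv (year-1) 4 - PySem.Int.floordiv (year-1) 100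
              + PySem.Int.floordiv (year-1) 400) 7
    PySem.Int.mod (s + 5) 7 + 1
  else
    let s := PySem.Int.mod (day + PySem.Int.floordiv (13*(month+1)) 5 + year
              + PySem.Int.floordiv year 4 - PySem.Int.floordiv year 100
              + PySem.Int.floordiv year 400) 7
    PySem.Int.mod (s + 5) 7 + 1

def pvA_is_leap (year : Int) : Bool :=
  ((PySem.Int.mod year 4 == 0) && !(PySem.Int.mod year 100 == 0))
    || ((PySem.Int.mod year 400 == 0) && (PySem.Int.mod year 100 == 0))

def pvA_num_days_in (month_num year : Int) : Int :=
  if month_num == 1 || month_num == 3 || month_num == 5 || month_num == 7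
      || month_num == 8 || month_num == 10 || month_num == 12 then 31
  else if month_num == 4 || month_num == 6 || month_num == 9 || month_num == 11 then 30
  else if month_num == 2 then (if pvA_is_leap year == true then 29 else 28)
  else 0

def num_weeks (month_num : Int) (year : Int) : Int :=
  let week := (PySem.List.pyRange 1 (pvA_num_days_in month_num year + 1) 1).foldl
      (fun w rows => if pv_day_of_week rows month_num year == 7 then w + 1 else w) 0
  if !(pv_day_of_week (pvA_num_days_in month_num year) month_num year == 7) then week + 1 else week

-- ===== PORT B =====
def pvB_is_leap (year : Int) : Bool :=
  (PySem.Int.mod year 4 == 0)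
    && (!(PySem.Int.mod year 100 == 0) || (PySem.Int.mod year 400 == 0))

def pvB_num_days_in (month_num year : Int) : Int :=
  if month_num == 2 then (if pvB_is_leap year then 29 else 28)
  else if month_num == 4 || month_num == 6 || month_num == 9 || month_num == 11 then 30
  else if month_num == 1 || month_num == 3 || month_num == 5 || month_num == 7
      || month_num == 8 || month_num == 10 || month_num == 12 then 31
  else 0

def num_weeks_alt (month_num : Int) (year : Int) : Int :=
  let ndays := pvB_num_days_in month_num year
  let w1 := pv_day_of_week 1 month_num year
  let fs := PySem.Int.mod (7 - w1) 7 + 1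
  let sundays := if fs > ndays then 0 else PySem.Int.floordiv (ndays - fs) 7 + 1
  sundays + (if pv_day_of_week ndays month_num year == 7 then 0 else 1)

-- ===== PRECONDITION & SPEC =====
def Spec_num_weeks (month_num : Int) (year : Int) (out : Int) : Prop := out = num_weeks_alt month_num year
instance (month_num : Int) (year : Int) (out : Int) : Decidable (Spec_num_weeks month_num year out) := by unfold Spec_num_weeks; infer_instance

-- ===== CLAIM (what is proved, stated in full; the proofs are below) =====
def Claim_equal_num_weeks : Prop := ∀ (month_num : Int) (year : Int), Dom_num_weeks month_num year → Spec_num_weeks month_num year (num_weeks month_num year)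

-- ===== LEMMAS AND PROOFS =====

-- constant part of the day-of-week formula (proof helper only)
def pvK (month year : Int) : Int :=
  if month == 1 || month == 2 then
    PySem.Int.floordiv (13*(month+13)) 5 + (year-1)
      + PySem.Int.floordiv (year-1) 4 - PySem.Int.floordiv (year-1) 100
      + PySem.Int.floordiv (year-1) 400
  else
    PySem.Int.floordiv (13*(month+1)) 5 + year
      + PySem.Int.floordiv year 4 - PySem.Int.floordiv year 100
      + PySem.Int.floordiv year 400

-- its residue mod 7
def pvE (month year : Int) : Int := pvK month year % 7

lemma pv_mod7 (a : Int) : PySem.Int.mod a 7 = a % 7 :=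
  PySem.Int.mod_eq_emod_of_pos (by norm_num)

lemma emod_shift (d a b c e f : Int) :
    ((d + a + b + c - e + f) % 7 + 5) % 7 + 1
      = (d + (a + b + c - e + f) % 7 + 5) % 7 + 1 := by omega

lemma dow_eq (d m y : Int) : pv_day_of_week d m y = (d + pvE m y + 5) % 7 + 1 := by
  unfold pv_day_of_week pvE pvK
  simp only [pv_mod7]
  split <;> exact emod_shift ..

lemma leap_eq (y : Int) : pvA_is_leap y = pvB_is_leap y := by
  unfold pvA_is_leap pvB_is_leap
  rw [Bool.eq_iff_iff]
  simp only [Bool.or_eq_true, Bool.and_eq_true, Bool.not_eq_true', beq_iff_eq,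
    beq_eq_false_iff_ne, PySem.Int.mod_eq_zero_iff_dvd]
  constructor
  · rintro (⟨h4, h100⟩ | ⟨h400, h100⟩) <;> refine ⟨by omega, ?_⟩ <;> simp_all
  · rintro ⟨h4, h⟩
    rcases h with h | h
    · exact Or.inl ⟨h4, by simpa using h⟩
    · by_cases h100 : (100 : Int) ∣ y
      · exact Or.inr ⟨h, h100⟩
      · exact Or.inl ⟨h4, by simpa using h100⟩

lemma days_eq (m y : Int) : pvA_num_days_in m y = pvB_num_days_in m y := by
  unfold pvA_num_days_in pvB_num_days_in
  rw [leap_eq]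
  split_ifs <;> simp_all <;> omega

lemma days_cases (m y : Int) :
    pvA_num_days_in m y = 0 ∨ pvA_num_days_in m y = 28 ∨ pvA_num_days_in m y = 29 ∨
    pvA_num_days_in m y = 30 ∨ pvA_num_days_in m y = 31 := by
  unfold pvA_num_days_in
  split_ifs <;> simp

lemma key (n e : Int)
    (hn : n = 0 ∨ n = 28 ∨ n = 29 ∨ n = 30 ∨ n = 31) (he : 0 ≤ e) (h7 : e < 7) :
    (if !((n + e + 5) % 7 + 1 == 7) then
      (PySem.List.pyRange 1 (n+1) 1).foldl
        (fun w d => if (d + e + 5) % 7 + 1 == 7 then w + 1 else w) 0 + 1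
     else
      (PySem.List.pyRange 1 (n+1) 1).foldl
        (fun w d => if (d + e + 5) % 7 + 1 == 7 then w + 1 else w) 0)
    = (if PySem.Int.mod (7 - ((1 + e + 5) % 7 + 1)) 7 + 1 > n then 0
       else PySem.Int.floordiv (n - (PySem.Int.mod (7 - ((1 + e + 5) % 7 + 1)) 7 + 1)) 7 + 1)
      + (if (n + e + 5) % 7 + 1 == 7 then 0 else 1) := by
  interval_cases e <;> rcases hn with h | h | h | h | h <;> subst h <;> decide

lemma num_weeks_key (m y : Int) : num_weeks m y = num_weeks_alt m y := by
  unfold num_weeks num_weeks_alt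
  rw [← days_eq]
  simp only [dow_eq]
  exact key (pvA_num_days_in m y) (pvE m y) (days_cases m y)
    (Int.emod_nonneg _ (by norm_num)) (Int.emod_lt_of_pos _ (by norm_num))

-- ===== VERDICT (by name: the statement is the Claim_ definition above) =====
theorem num_weeks_spec : Claim_equal_num_weeks := by
  intro m y _
  exact num_weeks_key m y
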